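-- pv_equiv track=rewrite | github.com/BaochaiXue/proj-QQTT-v2 | data_process/visualization/triplet_ply_compare.py | _aggregate_postprocess_origin
-- ===== SOURCE A (Python) =====
-- from typing import Any
--
-- def _aggregate_postprocess_origin(per_camera: list[dict[str, Any]]) -> str:
--     origins = {
--         str(item.get("ffs_native_like_postprocess_origin", "none"))
--         for item in per_camera
--         if str(item.get("ffs_native_like_postprocess_origin", "none")) != "none"
--     }
--     if not origins:
--         return "none"
--     if len(origins) == 1:
--         return next(iter(origins))
--     return "mixed"
-- ===== SOURCE B (Python) =====
-- def _aggregate_postprocess_origin(per_camera):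
--     found = None
--     for item in per_camera:
--         origin = str(item.get("ffs_native_like_postprocess_origin", "none"))
--         if origin == "none":
--             continue
--         if found is None:
--             found = origin
--         elif origin != found:
--             return "mixed"
--     return found if found is not None else "none"
-- ===== Notes on version B (the rewrite author's own statement) =====
-- stated objective: alternative
-- what changed: Replaces the build-a-set-then-count-its-cardinality approach with a single pass that keeps one candidate origin and returns 'mixed' immediately on the first conflicting origin.
import Mathlib
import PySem

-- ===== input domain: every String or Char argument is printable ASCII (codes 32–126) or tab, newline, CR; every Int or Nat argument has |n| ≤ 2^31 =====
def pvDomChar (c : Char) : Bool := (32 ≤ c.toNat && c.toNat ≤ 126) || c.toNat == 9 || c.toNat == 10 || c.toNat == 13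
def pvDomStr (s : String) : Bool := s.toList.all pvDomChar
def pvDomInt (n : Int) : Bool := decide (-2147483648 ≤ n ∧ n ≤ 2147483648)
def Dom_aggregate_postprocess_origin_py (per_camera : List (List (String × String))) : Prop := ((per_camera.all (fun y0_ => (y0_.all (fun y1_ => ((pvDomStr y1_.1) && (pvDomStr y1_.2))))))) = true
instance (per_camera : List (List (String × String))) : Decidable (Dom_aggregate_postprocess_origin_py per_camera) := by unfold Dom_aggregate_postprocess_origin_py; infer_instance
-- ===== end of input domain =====

-- B replaces A's build-a-set-then-count approach with a single pass holding one candidate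
-- origin, returning "mixed" on the first conflict (alternative decomposition, same cost).

-- ===== PORT A =====
-- str(item.get("ffs_native_like_postprocess_origin", "none")); values are strings, so str() is identity
def pvOriginA (item : List (String × String)) : String :=
  (PySem.Dict.mk item).getD "ffs_native_like_postprocess_origin" "none"

def aggregate_postprocess_origin_py (per_camera : List (List (String × String))) : String :=
  -- the set comprehension: elements in iteration order, deduplicated = Set.ofList of the filtered list
  let origins : PySem.Set String :=
    PySem.Set.ofList ((per_camera.map pvOriginA).filter (fun o => o ≠ "none"))
  if origins.isEmpty then "none"
  else if origins.length = 1 then origins.headD ""  -- next(iter(origins)): exact since the set has exactly one element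
  else "mixed"

-- ===== PORT B =====
def pvOriginB (item : List (String × String)) : String :=
  (PySem.Dict.mk item).getD "ffs_native_like_postprocess_origin" "none"

def pvLoopB (found : Option String) : List (List (String × String)) → String
  | [] => match found with | some f => f | none => "none"
  | item :: rest =>
    let origin := pvOriginB item
    if origin = "none" then pvLoopB found rest
    else match found with
      | none => pvLoopB (some origin) rest
      | some f => if origin ≠ f then "mixed" else pvLoopB found rest

def aggregate_postprocess_origin_py_alt (per_camera : List (List (String × String))) : String :=
  pvLoopB none per_camera

-- ===== PRECONDITION & SPEC =====
def Spec_aggregate_postprocess_origin_py (per_camera : List (List (String × String))) (out : String) : Prop := out = aggregate_postprocess_origin_py_alt per_camera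
instance (per_camera : List (List (String × String))) (out : String) : Decidable (Spec_aggregate_postprocess_origin_py per_camera out) := by unfold Spec_aggregate_postprocess_origin_py; infer_instance

-- ===== CLAIM (what is proved, stated in full; the proofs are below) =====
def Claim_equal_aggregate_postprocess_origin_py : Prop := ∀ (per_camera : List (List (String × String))), Dom_aggregate_postprocess_origin_py per_camera → Spec_aggregate_postprocess_origin_py per_camera (aggregate_postprocess_origin_py per_camera)

-- ===== LEMMAS AND PROOFS =====

-- The common reference function on the filtered list of origins.
def pvClassify : List String → String
  | [] => "none"
  | x :: r => if r.all (fun y => y = x) then x else "mixed"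

def pvOs (per_camera : List (List (String × String))) : List String :=
  (per_camera.map pvOriginA).filter (fun o => o ≠ "none")

lemma pvOriginB_eq : pvOriginB = pvOriginA := rfl

lemma pvOs_cons (item : List (String × String)) (rest : List (List (String × String))) :
    pvOs (item :: rest) =
      if pvOriginA item = "none" then pvOs rest else pvOriginA item :: pvOs rest := by
  simp [pvOs]
  split_ifs with h <;> simp [h]

lemma pvLoopB_some_cons (f : String) (item : List (String × String))
    (rest : List (List (String × String))) :
    pvLoopB (some f) (item :: rest) =
      if pvOriginB item = "none" then pvLoopB (some f) rest
      else if pvOriginB item ≠ f then "mixed" else pvLoopB (some f) rest := rfl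

lemma pvLoopB_none_cons (item : List (String × String))
    (rest : List (List (String × String))) :
    pvLoopB none (item :: rest) =
      if pvOriginB item = "none" then pvLoopB none rest
      else pvLoopB (some (pvOriginB item)) rest := rfl

-- B's loop with a committed candidate checks that all remaining origins equal it.
lemma pvLoopB_some (per_camera : List (List (String × String))) (f : String) :
    pvLoopB (some f) per_camera =
      if (pvOs per_camera).all (fun y => y = f) then f else "mixed" := by
  induction per_camera with
  | nil => simp [pvLoopB, pvOs]
  | cons item rest ih =>
    rw [pvLoopB_some_cons, pvOriginB_eq, pvOs_cons]
    by_cases h : pvOriginA item = "none"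
    · simp [h, ih]
    · by_cases hf : pvOriginA item = f
      · subst hf
        simp [h, ih]
      · simp [h, hf]

lemma pvLoopB_none (per_camera : List (List (String × String))) :
    pvLoopB none per_camera = pvClassify (pvOs per_camera) := by
  induction per_camera with
  | nil => simp [pvLoopB, pvOs, pvClassify]
  | cons item rest ih =>
    rw [pvLoopB_none_cons, pvOriginB_eq, pvOs_cons]
    by_cases h : pvOriginA item = "none"
    · simpa [h] using ih
    · simp [h, pvLoopB_some, pvClassify]

-- ofList of an all-equal nonempty list collapses to a singleton.
lemma pvFoldl_add_all_eq (r : List String) (x : String) (h : r.all (fun y => y = x)) :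
    r.foldl PySem.Set.add [x] = [x] := by
  induction r with
  | nil => rfl
  | cons y r' ih =>
    simp only [List.all_cons, Bool.and_eq_true, decide_eq_true_eq] at h
    simp only [List.foldl_cons, h.1]
    rw [show PySem.Set.add [x] x = [x] by simp [PySem.Set.add, PySem.Set.contains]]
    exact ih h.2

lemma pvOfList_all_eq (r : List String) (x : String) (h : r.all (fun y => y = x)) :
    PySem.Set.ofList (x :: r) = [x] := by
  rw [PySem.Set.ofList_eq_foldl]
  simp only [List.foldl_cons]
  rw [show PySem.Set.add [] x = [x] from rfl]
  exact pvFoldl_add_all_eq r x h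

-- A list containing two distinct members has length ≠ 1.
lemma pvTwo_mem_length {s : List String} {x y : String}
    (hx : x ∈ s) (hy : y ∈ s) (hxy : x ≠ y) : s.length ≠ 1 := by
  intro h1
  match s, h1 with
  | [z], _ =>
    simp only [List.mem_singleton] at hx hy
    exact hxy (hx.trans hy.symm)

-- A's set-and-count body equals pvClassify on the filtered list.
lemma pvA_eq_classify (xs : List String) :
    (if (PySem.Set.ofList xs).isEmpty then "none"
     else if (PySem.Set.ofList xs).length = 1 then (PySem.Set.ofList xs).headD ""
     else "mixed") = pvClassify xs := by
  match xs with
  | [] => rfl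
  | x :: r =>
    by_cases h : r.all (fun y => y = x)
    · simp [pvOfList_all_eq r x h, pvClassify, h]
    · have h' := h
      simp only [List.all_eq_true, decide_eq_true_eq, not_forall] at h'
      obtain ⟨y, hy, hyx⟩ := h'
      have hxm : x ∈ PySem.Set.ofList (x :: r) := by
        rw [PySem.Set.mem_ofList]; exact List.mem_cons_self ..
      have hym : y ∈ PySem.Set.ofList (x :: r) := by
        rw [PySem.Set.mem_ofList]; exact List.mem_cons_of_mem _ hy
      have hne : (PySem.Set.ofList (x :: r)).isEmpty = false := by
        rw [List.isEmpty_eq_false_iff]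
        intro hc; rw [hc] at hxm; exact (List.not_mem_nil hxm)
      have hlen := pvTwo_mem_length hym hxm hyx
      have hcl : pvClassify (x :: r) = "mixed" := by simp [pvClassify, h]
      simp [hne, hlen, hcl]

-- ===== VERDICT (by name: the statement is the Claim_ definition above) =====
theorem aggregate_postprocess_origin_py_spec : Claim_equal_aggregate_postprocess_origin_py := by
  intro pc _
  show aggregate_postprocess_origin_py pc = aggregate_postprocess_origin_py_alt pc
  rw [show aggregate_postprocess_origin_py_alt pc = pvClassify (pvOs pc) from pvLoopB_none pc]
  exact pvA_eq_classify (pvOs pc)
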